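-- pv_equiv track=rewrite | github.com/RaduTogoe/PythonSavnet | c2-4/C4Suplimentar/4.py | lideri
-- ===== SOURCE A (Python) =====
-- def lideri(l : list):
--     liderii = []
--     for i in range (0, len(l)):
--         ok = 1
--         for j in range (i + 1, len(l)):
--             if l[i] < l[j]:
--                 ok = 0
--                 break
--         if ok == 1:
--             liderii.append(l[i])
--     return liderii
-- ===== SOURCE B (Python) =====
-- def lideri(l : list):
--     # right-to-left scan tracking the suffix maximum: O(n) instead of A's O(n^2)
--     liderii = []
--     m = None
--     for x in reversed(l):
--         if m is None or m <= x:
--             liderii.append(x)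
--         if m is None or m < x:
--             m = x
--     liderii.reverse()
--     return liderii
-- ===== Notes on version B (the rewrite author's own statement) =====
-- stated objective: faster
-- what changed: Replaced A's nested index loops (for each element, scan everything to its right) by a single right-to-left pass that tracks the suffix maximum and builds the result back-to-front.
import Mathlib
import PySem

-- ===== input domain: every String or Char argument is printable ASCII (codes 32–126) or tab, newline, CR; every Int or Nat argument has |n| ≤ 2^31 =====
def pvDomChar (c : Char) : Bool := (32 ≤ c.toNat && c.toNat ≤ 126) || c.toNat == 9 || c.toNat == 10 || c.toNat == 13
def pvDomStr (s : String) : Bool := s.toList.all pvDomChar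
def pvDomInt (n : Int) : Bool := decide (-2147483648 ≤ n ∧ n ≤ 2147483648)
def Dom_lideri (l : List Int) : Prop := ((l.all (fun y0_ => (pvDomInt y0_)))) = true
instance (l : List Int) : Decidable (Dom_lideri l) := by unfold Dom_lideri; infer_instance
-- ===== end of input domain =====

-- B replaces A's quadratic nested index scan by a single right-to-left pass tracking the suffix maximum (O(n)).

-- ===== PORT A =====
-- inner 'for j in range(i+1, len(l))' loop with its break, returning the ok flag
def okLoop (l : List Int) (i : Int) : List Int → Int
  | [] => 1
  | j :: rest =>
    if PySem.List.pyGetD l i 0 < PySem.List.pyGetD l j 0 then 0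
    else okLoop l i rest

def lideri (l : List Int) : List Int :=
  (PySem.List.pyRange 0 l.length).foldl (fun liderii i =>
    let ok := okLoop l i (PySem.List.pyRange (i + 1) l.length)
    if ok = 1 then liderii ++ [PySem.List.pyGetD l i 0] else liderii) []

-- ===== PORT B =====
def lideri_alt (l : List Int) : List Int :=
  let st := l.reverse.foldl (fun (st : List Int × Option Int) x =>
    ( match st.2 with
      | none => st.1 ++ [x]
      | some m => if m ≤ x then st.1 ++ [x] else st.1,
      match st.2 with
      | none => some x
      | some m => if m < x then some x else some m)) ([], none)
  st.1.reverse

-- ===== PRECONDITION & SPEC =====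
def Spec_lideri (l : List Int) (out : List Int) : Prop := out = lideri_alt l
instance (l : List Int) (out : List Int) : Decidable (Spec_lideri l out) := by unfold Spec_lideri; infer_instance

-- ===== CLAIM (what is proved, stated in full; the proofs are below) =====
def Claim_equal_lideri : Prop := ∀ (l : List Int), Dom_lideri l → Spec_lideri l (lideri l)

-- ===== LEMMAS AND PROOFS =====

-- common reference form: keep x iff every element to its right is ≤ x
def leaders : List Int → List Int
  | [] => []
  | x :: xs => if xs.all (fun y => decide (y ≤ x)) then x :: leaders xs else leaders xs

-- the suffix maximum B maintains, mirrored structurally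
def maxOpt : List Int → Option Int
  | [] => none
  | x :: t =>
    match maxOpt t with
    | none => some x
    | some m => if m < x then some x else some m

lemma maxOpt_eq_none_iff (l : List Int) : maxOpt l = none ↔ l = [] := by
  cases l with
  | nil => simp [maxOpt]
  | cons x t =>
    cases h : maxOpt t
    · simp [maxOpt, h]
    · simp only [maxOpt, h]
      constructor
      · intro hc
        split at hc <;> simp at hc
      · intro hc
        simp at hc

lemma maxOpt_isMax (l : List Int) (m : Int) (h : maxOpt l = some m) :
    ∀ y ∈ l, y ≤ m := by
  induction l generalizing m with
  | nil => simp [maxOpt] at h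
  | cons x t ih =>
    intro y hy
    cases ht : maxOpt t with
    | none =>
      simp only [maxOpt, ht] at h
      simp only [Option.some.injEq] at h
      subst h
      rcases (maxOpt_eq_none_iff t).mp ht with rfl
      simp at hy
      omega
    | some m' =>
      simp only [maxOpt, ht] at h
      have hmax := ih m' ht
      rcases List.mem_cons.mp hy with rfl | hyt
      · by_cases hc : m' < y
        · rw [if_pos hc, Option.some.injEq] at h
          omega
        · rw [if_neg hc, Option.some.injEq] at h
          omega
      · have hym := hmax y hyt
        by_cases hc : m' < x
        · rw [if_pos hc, Option.some.injEq] at h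
          omega
        · rw [if_neg hc, Option.some.injEq] at h
          omega

lemma maxOpt_mem (l : List Int) (m : Int) (h : maxOpt l = some m) : m ∈ l := by
  induction l generalizing m with
  | nil => simp [maxOpt] at h
  | cons x t ih =>
    cases ht : maxOpt t with
    | none =>
      simp only [maxOpt, ht] at h
      simp only [Option.some.injEq] at h
      subst h
      exact List.mem_cons_self
    | some m' =>
      simp only [maxOpt, ht] at h
      by_cases hc : m' < x
      · rw [if_pos hc, Option.some.injEq] at h
        subst h
        exact List.mem_cons_self
      · rw [if_neg hc, Option.some.injEq] at h
        subst h
        exact List.mem_cons_of_mem _ (ih _ ht)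

-- B's fold computes (leaders, suffix max)
lemma alt_foldr (l : List Int) :
    l.foldr (fun x (st : List Int × Option Int) =>
      ( match st.2 with
        | none => st.1 ++ [x]
        | some m => if m ≤ x then st.1 ++ [x] else st.1,
        match st.2 with
        | none => some x
        | some m => if m < x then some x else some m)) ([], none)
    = ((leaders l).reverse, maxOpt l) := by
  induction l with
  | nil => simp [leaders, maxOpt]
  | cons x xs ih =>
    simp only [List.foldr_cons, ih]
    refine Prod.ext ?_ rfl
    simp only [leaders]
    cases hm : maxOpt xs with
    | none =>
      rcases (maxOpt_eq_none_iff xs).mp hm with rfl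
      simp [leaders]
    | some m =>
      have hall : xs.all (fun y => decide (y ≤ x)) = decide (m ≤ x) := by
        by_cases hmx : m ≤ x
        · simp only [hmx, decide_true, List.all_eq_true, decide_eq_true_eq]
          intro y hy; exact le_trans (maxOpt_isMax xs m hm y hy) hmx
        · simp only [hmx, decide_false, List.all_eq_false]
          exact ⟨m, maxOpt_mem xs m hm, by simpa using hmx⟩
      by_cases hmx : m ≤ x <;> simp [hall, hmx]

lemma lideri_alt_eq_leaders (l : List Int) : lideri_alt l = leaders l := by
  unfold lideri_alt
  simp only [List.foldl_reverse, alt_foldr, List.reverse_reverse]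

-- A's inner loop is an 'all' test
lemma okLoop_eq (l : List Int) (i : Int) (js : List Int) :
    okLoop l i js =
      if js.all (fun j => decide (PySem.List.pyGetD l j 0 ≤ PySem.List.pyGetD l i 0)) then 1 else 0 := by
  induction js with
  | nil => simp [okLoop]
  | cons j rest ih =>
    simp only [okLoop, List.all_cons, ih]
    by_cases h : PySem.List.pyGetD l i 0 < PySem.List.pyGetD l j 0
    · simp [h, not_le.mpr h]
    · simp [h, not_lt.mp h]

-- pyRange from a Nat start is the tail of range
lemma pyRange_natCast_drop (a n : Nat) :
    PySem.List.pyRange (a : Int) (n : Int) = ((List.range n).drop a).map (fun k => (k : Int)) := by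
  induction n with
  | zero =>
    simp
  | succ m ih =>
    by_cases ham : a ≤ m
    · rw [show ((m + 1 : Nat) : Int) = (m : Int) + 1 by push_cast; ring,
        PySem.List.pyRange_one_succ_right (by exact_mod_cast ham), ih,
        List.range_succ, List.drop_append_of_le_length (by simpa using ham)]
      simp
    · have hnil : PySem.List.pyRange (a : Int) ((m+1 : Nat) : Int) = [] :=
        List.eq_nil_iff_forall_not_mem.mpr (fun x hx => by
          have := PySem.List.mem_pyRange_one.mp hx; omega)
      rw [hnil, List.drop_eq_nil_of_le (by simpa using ham)]
      simp

lemma map_getD_drop_range (l : List Int) (a : Nat) :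
    ((List.range l.length).drop a).map (fun k => l.getD k 0) = l.drop a := by
  induction l generalizing a with
  | nil => simp
  | cons x xs ih =>
    cases a with
    | zero =>
      simp only [List.length_cons, List.range_succ_eq_map, List.drop_zero, List.map_cons,
        List.map_map]
      rw [show ((fun k => (x :: xs).getD k 0) ∘ Nat.succ) = fun k => xs.getD k 0 from rfl]
      have := ih 0
      simpa using congrArg (x :: ·) this
    | succ b =>
      simp only [List.length_cons, List.range_succ_eq_map, List.drop_succ_cons, ← List.map_drop,
        List.map_map]
      rw [show ((fun k => (x :: xs).getD k 0) ∘ Nat.succ) = fun k => xs.getD k 0 from rfl]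
      simpa using ih b

-- the inner map over pyRange (i+1, n) reads exactly l.drop (i+1)
lemma inner_all (l : List Int) (i : Nat) :
    (PySem.List.pyRange ((i : Int) + 1) (l.length : Int)).all
        (fun j => decide (PySem.List.pyGetD l j 0 ≤ PySem.List.pyGetD l (i : Int) 0))
    = (l.drop (i + 1)).all (fun y => decide (y ≤ l.getD i 0)) := by
  rw [show ((i : Int) + 1) = ((i + 1 : Nat) : Int) by push_cast; ring,
    pyRange_natCast_drop (i + 1) l.length, List.all_map]
  have hmap : ((List.range l.length).drop (i + 1)).map (fun k => l.getD k 0) = l.drop (i + 1) :=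
    map_getD_drop_range l (i + 1)
  rw [← hmap, List.all_map]
  simp [Function.comp_def, PySem.List.pyGetD_natCast]

-- Nat-indexed reformulation of A equals leaders
lemma filter_range_eq_leaders (l : List Int) :
    ((List.range l.length).filter
        (fun i => (l.drop (i + 1)).all (fun y => decide (y ≤ l.getD i 0)))).map
      (fun i => l.getD i 0) = leaders l := by
  induction l with
  | nil => simp [leaders]
  | cons x xs ih =>
    simp only [List.length_cons, List.range_succ_eq_map, List.filter_cons, List.filter_map,
      List.drop_succ_cons, List.drop_zero, List.getD_cons_zero]
    rw [show ((fun i => (List.drop i xs).all fun y => decide (y ≤ (x :: xs).getD i 0)) ∘ Nat.succ)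
        = fun i => (List.drop (i + 1) xs).all fun y => decide (y ≤ xs.getD i 0) from rfl]
    simp only [leaders]
    by_cases hc : xs.all (fun y => decide (y ≤ x)) = true
    · rw [if_pos hc, if_pos hc, List.map_cons, List.map_map,
        show ((fun i => (x :: xs).getD i 0) ∘ Nat.succ) = fun i => xs.getD i 0 from rfl, ih]
      simp
    · rw [if_neg (by simpa using hc), if_neg (by simpa using hc), List.map_map,
        show ((fun i => (x :: xs).getD i 0) ∘ Nat.succ) = fun i => xs.getD i 0 from rfl, ih]

lemma lideri_eq_leaders (l : List Int) : lideri l = leaders l := by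
  unfold lideri
  rw [PySem.List.foldl_congr_mem _ _
    (fun liderii i => if (PySem.List.pyRange (i + 1) (l.length : Int)).all
        (fun j => decide (PySem.List.pyGetD l j 0 ≤ PySem.List.pyGetD l i 0)) = true
      then liderii ++ [PySem.List.pyGetD l i 0] else liderii) []
    (by
      intro acc i _
      simp only [okLoop_eq]
      by_cases h : (PySem.List.pyRange (i + 1) (l.length : Int)).all
          (fun j => decide (PySem.List.pyGetD l j 0 ≤ PySem.List.pyGetD l i 0)) = true
      · simp [h]
      · simp [h])]
  rw [PySem.List.foldl_append_if _ (fun i => PySem.List.pyGetD l i 0)]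
  rw [show ((l.length : Int)) = ((l.length : Nat) : Int) from rfl,
    PySem.List.pyRange_zero_natCast, List.filter_map, List.map_map]
  have hbody : ∀ i : Nat,
      ((fun i => (PySem.List.pyRange (i + 1) (l.length : Int)).all
          (fun j => decide (PySem.List.pyGetD l j 0 ≤ PySem.List.pyGetD l i 0))) ∘
        (fun k : Nat => (k : Int))) i
      = (l.drop (i + 1)).all (fun y => decide (y ≤ l.getD i 0)) := by
    intro i
    simp only [Function.comp]
    exact inner_all l i
  rw [List.filter_congr (fun i _ => hbody i), List.nil_append]
  rw [show ((fun i => PySem.List.pyGetD l i 0) ∘ (fun k : Nat => (k : Int)))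
      = fun i : Nat => l.getD i 0 from funext (fun i => by
        simp [Function.comp, PySem.List.pyGetD_natCast])]
  exact filter_range_eq_leaders l

-- ===== VERDICT (by name: the statement is the Claim_ definition above) =====
theorem lideri_spec : Claim_equal_lideri := by
  intro l _
  unfold Spec_lideri
  rw [lideri_eq_leaders, lideri_alt_eq_leaders]
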